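-- pv_equiv track=rewrite | github.com/kosonocky/bits-to-binders | scripts/auc.py | longest_duplicated_substring
-- ===== SOURCE A (Python) =====
-- def longest_duplicated_substring(seq):
--     """
--     Longest non overlapping duplicated substring.
--     Return (length, substring, total_occurrences).
--     """
--     def count_overlapping(haystack, needle):
--         if not needle:
--             return 0
--         count = 0
--         i = 0
--         while True:
--             i = haystack.find(needle, i)
--             if i == -1:
--                 break
--             count += 1
--             i += 1
--         return count
--
--     n = len(seq)
--     suffixes = sorted((seq[i:], i) for i in range(n))
--
--     max_len = 0
--     best_substring = ""
--
--     for i in range(1, n):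
--         s1, idx1 = suffixes[i - 1]
--         s2, idx2 = suffixes[i]
--
--         j = 0
--         limit = min(len(s1), len(s2))
--         while j < limit and s1[j] == s2[j]:
--             j += 1
--
--         distance = abs(idx1 - idx2)
--         lcp_no_overlap = min(j, distance)
--
--         if lcp_no_overlap > max_len:
--             max_len = lcp_no_overlap
--             start = min(idx1, idx2)
--             best_substring = seq[start : start + max_len]
--
--     if max_len == 0:
--         return 0, "", 0
--
--     total_occurrences = count_overlapping(seq, best_substring)
--     return max_len, best_substring, total_occurrences
-- ===== SOURCE B (Python) =====
-- def longest_duplicated_substring(seq):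
--     """
--     Longest non overlapping duplicated substring (same adjacent-suffix rule).
--     Return (length, substring, total_occurrences).
--     Suffix array + Kasai's LCP algorithm: all adjacent lcps come out of one
--     amortized pass in text order, instead of a fresh character walk per pair.
--     """
--     n = len(seq)
--     sa = sorted(range(n), key=lambda i: seq[i:])
--     rank = [0] * n
--     for r, i in enumerate(sa):
--         rank[i] = r
--     lcp = [0] * n
--     h = 0
--     for i in range(n):
--         r = rank[i]
--         if r > 0:
--             j = sa[r - 1]
--             while i + h < n and j + h < n and seq[i + h] == seq[j + h]:
--                 h += 1
--             lcp[r] = h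
--             if h:
--                 h -= 1
--         else:
--             h = 0
--
--     best_len = 0
--     best_start = 0
--     for r in range(1, n):
--         v = min(lcp[r], abs(sa[r] - sa[r - 1]))
--         if v > best_len:
--             best_len = v
--             best_start = min(sa[r], sa[r - 1])
--
--     if best_len == 0:
--         return 0, "", 0
--
--     sub = seq[best_start:best_start + best_len]
--     occurrences = sum(seq[k:k + best_len] == sub for k in range(n))
--     return best_len, sub, occurrences
-- ===== Notes on version B (the rewrite author's own statement) =====
-- stated objective: faster
-- what changed: B computes all adjacent suffix lcps with Kasai's algorithm (an inverse rank array plus the amortized h-carry pass in text order, each lcp extended from the previous h instead of recomputed) rather than A's fresh per-pair character walk over sorted suffix strings, and counts occurrences of the best substring by a single slice-comparison sweep instead of A's repeated str.find loop.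
import Mathlib
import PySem

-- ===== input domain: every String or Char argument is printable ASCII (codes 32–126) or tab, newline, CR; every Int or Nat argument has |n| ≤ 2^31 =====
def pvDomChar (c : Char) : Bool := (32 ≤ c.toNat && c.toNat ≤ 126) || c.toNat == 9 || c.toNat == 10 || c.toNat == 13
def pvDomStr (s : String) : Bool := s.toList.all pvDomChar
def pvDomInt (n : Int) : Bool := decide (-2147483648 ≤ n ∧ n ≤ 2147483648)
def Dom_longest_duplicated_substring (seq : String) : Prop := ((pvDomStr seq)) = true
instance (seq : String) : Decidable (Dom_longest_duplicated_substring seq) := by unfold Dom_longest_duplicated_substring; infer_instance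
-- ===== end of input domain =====

-- B replaces A's per-adjacent-pair character walks by Kasai's amortized O(n) LCP pass over
-- a suffix array with its inverse rank array, and counts occurrences by one slice sweep
-- instead of repeated find (objective: faster, measured; same return value).

-- ===== PORT A =====

-- A's inner while loop 'while j < limit and s1[j] == s2[j]: j += 1' as the obvious
-- structural recursion over the two suffix strings (returns the final j).
def pvLcpChars : List Char → List Char → Nat
  | x :: xs, y :: ys => if x = y then pvLcpChars xs ys + 1 else 0
  | _, _ => 0

-- A's count_overlapping 'while True' find loop; fuel = len(haystack)+1 bounds the
-- number of iterations (each iteration strictly increases i ≤ len(haystack)).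
def pvCountOvAux (hay nd : List Char) : Nat → Nat → Int → Int
  | 0, _, c => c
  | fuel + 1, i, c =>
    let f := PySem.Chars.findFrom hay nd (i : Int) none
    if f = -1 then c else pvCountOvAux hay nd fuel (f.toNat + 1) (c + 1)

def pvCountOverlapping (hay nd : List Char) : Int :=
  if nd = [] then 0 else pvCountOvAux hay nd (hay.length + 1) 0 0

def longest_duplicated_substring (seq : String) : Int × String × Int :=
  let l := seq.toList
  let n : Int := PySem.List.len l
  let suffixes := PySem.List.sorted2
      ((PySem.List.pyRange 0 n 1).map (fun i => (PySem.List.slice l (some i) none, i)))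
      (fun p => p.1) (fun p => p.2)
  let r := (PySem.List.pyRange 1 n 1).foldl (fun (st : Int × List Char) i =>
      let p1 := PySem.List.pyGetD suffixes (i - 1) ([], 0)
      let p2 := PySem.List.pyGetD suffixes i ([], 0)
      let j : Int := pvLcpChars p1.1 p2.1
      let distance := |p1.2 - p2.2|
      let lcp_no_overlap := min j distance
      if lcp_no_overlap > st.1 then
        let start := min p1.2 p2.2
        (lcp_no_overlap, PySem.List.slice l (some start) (some (start + lcp_no_overlap)))
      else st) (0, ([] : List Char))
  if r.1 = 0 then (0, "", 0)
  else (r.1, String.ofList r.2, pvCountOverlapping l r.2)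

-- ===== PORT B =====

-- B's (Kasai's) inner while loop 'while i+h < n and j+h < n and seq[i+h] == seq[j+h]: h += 1'
-- starting from the carried h (k); also used with k = 0 on the A side of the proofs.
def pvLcpIdx (l : List Char) (a b k : Nat) : Nat :=
  if h : a + k < l.length ∧ b + k < l.length then
    if l[a + k]'h.1 = l[b + k]'h.2 then pvLcpIdx l a b (k + 1) else k
  else k
termination_by l.length - k
decreasing_by omega

def longest_duplicated_substring_alt (seq : String) : Int × String × Int :=
  let l := seq.toList
  let n : Int := PySem.List.len l
  let sa := PySem.List.sorted (PySem.List.pyRange 0 n 1)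
      (fun i => PySem.List.slice l (some i) none)
  -- rank[i] = r for r, i in enumerate(sa)
  let rank := (PySem.List.enumerate sa).foldl
      (fun rk (p : Int × Int) => PySem.List.pySetD rk p.2 p.1)
      (List.replicate l.length (0 : Int))
  -- Kasai: lcp[rank[i]] extended from the previous h
  let lcph := (PySem.List.pyRange 0 n 1).foldl (fun (st : List Int × Int) i =>
      let r := PySem.List.pyGetD rank i 0
      if r > 0 then
        let j := PySem.List.pyGetD sa (r - 1) 0
        let h : Int := (pvLcpIdx l i.toNat j.toNat st.2.toNat : Nat)
        (PySem.List.pySetD st.1 r h, if h ≠ 0 then h - 1 else h)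
      else (st.1, 0)) (List.replicate l.length (0 : Int), 0)
  let lcp := lcph.1
  let best := (PySem.List.pyRange 1 n 1).foldl (fun (bs : Int × Int) r =>
      let v := min (PySem.List.pyGetD lcp r 0)
          |PySem.List.pyGetD sa r 0 - PySem.List.pyGetD sa (r - 1) 0|
      if v > bs.1 then
        (v, min (PySem.List.pyGetD sa r 0) (PySem.List.pyGetD sa (r - 1) 0))
      else bs) (0, 0)
  if best.1 = 0 then (0, "", 0)
  else
    let sub := PySem.List.slice l (some best.2) (some (best.2 + best.1))
    (best.1, String.ofList sub,
      (PySem.List.pyRange 0 n 1).foldl (fun acc k =>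
        acc + (if PySem.List.slice l (some k) (some (k + best.1)) = sub then 1 else 0)) 0)

-- ===== PRECONDITION & SPEC =====
def Spec_longest_duplicated_substring (seq : String) (out : Int × String × Int) : Prop := out = longest_duplicated_substring_alt seq
instance (seq : String) (out : Int × String × Int) : Decidable (Spec_longest_duplicated_substring seq out) := by unfold Spec_longest_duplicated_substring; infer_instance

-- ===== CLAIM (what is proved, stated in full; the proofs are below) =====
def Claim_equal_longest_duplicated_substring : Prop := ∀ (seq : String), Dom_longest_duplicated_substring seq → Spec_longest_duplicated_substring seq (longest_duplicated_substring seq)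

-- ===== LEMMAS AND PROOFS =====

-- proof-only helpers: the canonical middle form both ports are reduced to
def pvStepA (l : List Char) (st : Int × List Char) (p : Int × Int) : Int × List Char :=
  let p1 := (PySem.List.slice l (some p.1) none, p.1)
  let p2 := (PySem.List.slice l (some p.2) none, p.2)
  let j : Int := pvLcpChars p1.1 p2.1
  let distance := |p1.2 - p2.2|
  let lcp_no_overlap := min j distance
  if lcp_no_overlap > st.1 then
    let start := min p1.2 p2.2
    (lcp_no_overlap, PySem.List.slice l (some start) (some (start + lcp_no_overlap)))
  else st

def pvStepB (l : List Char) (st : Int × Int) (p : Int × Int) : Int × Int :=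
  let v := min ((pvLcpIdx l p.1.toNat p.2.toNat 0 : Nat) : Int) |p.1 - p.2|
  if v > st.1 then (v, min p.1 p.2) else st

def pvSuffArr (l : List Char) : List Int :=
  PySem.List.sorted ((List.range l.length).map (fun k : Nat => (k : Int)))
    (fun i => PySem.List.slice l (some i) none)

def pvCanon (seq : String) : Int × String × Int :=
  let l := seq.toList
  let r := ((pvSuffArr l).zip (pvSuffArr l).tail).foldl (pvStepB l) (0, 0)
  if r.1 = 0 then (0, "", 0)
  else (r.1, String.ofList (PySem.List.slice l (some r.2) (some (r.2 + r.1))),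
    (List.range l.length).foldl (fun (x : Int) (y : Nat) =>
      x + if PySem.List.slice l (some (y : Int)) (some ((y : Int) + r.1))
          = PySem.List.slice l (some r.2) (some (r.2 + r.1)) then 1 else 0) 0)

def pvInv (l : List Char) (stA : Int × List Char) (stB : Int × Int) : Prop :=
  stA.1 = stB.1 ∧ 0 ≤ stB.1 ∧
    (0 < stB.1 → 0 ≤ stB.2 ∧ stB.2 + stB.1 ≤ (l.length : Int) ∧
      stA.2 = (l.drop stB.2.toNat).take stB.1.toNat)

theorem pv_insertBy_congr {α : Type} (b₁ b₂ : α → α → Bool) (x : α) (acc : List α)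
    (h : ∀ y ∈ acc, b₁ x y = b₂ x y) :
    PySem.List.insertBy b₁ x acc = PySem.List.insertBy b₂ x acc := by
  induction acc with
  | nil => simp [PySem.List.insertBy]
  | cons y ys ih =>
    simp only [PySem.List.insertBy]
    rw [h y (by simp)]
    split
    · rfl
    · rw [ih (fun z hz => h z (by simp [hz]))]

theorem pv_foldl_insertBy_congr {α : Type} (b₁ b₂ : α → α → Bool) (dom : List α)
    (h : ∀ x ∈ dom, ∀ y ∈ dom, b₁ x y = b₂ x y) :
    ∀ (xs acc : List α), (∀ x ∈ xs, x ∈ dom) → (∀ y ∈ acc, y ∈ dom) →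
    xs.foldl (fun acc x => PySem.List.insertBy b₁ x acc) acc
      = xs.foldl (fun acc x => PySem.List.insertBy b₂ x acc) acc := by
  intro xs
  induction xs with
  | nil => intro acc _ _; rfl
  | cons x xs ih =>
    intro acc hxs hacc
    simp only [List.foldl_cons]
    rw [pv_insertBy_congr b₁ b₂ x acc (fun y hy => h x (hxs x (by simp)) y (hacc y hy))]
    exact ih _ (fun z hz => hxs z (by simp [hz]))
      (fun y hy => by
        rcases (PySem.List.mem_insertBy b₂ x y acc).1 hy with h' | h'
        · exact h' ▸ hxs x (by simp)
        · exact hacc y h')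

theorem pv_sorted2_eq_sorted_fst (P : List (List Char × Int))
    (hinj : ∀ x ∈ P, ∀ y ∈ P, x.1 = y.1 → x = y) :
    PySem.List.sorted2 P (fun p => p.1) (fun p => p.2)
      = PySem.List.sorted P (fun p => p.1) := by
  unfold PySem.List.sorted2 PySem.List.sorted
  simp only [if_neg (by decide : ¬ (false = true))]
  apply pv_foldl_insertBy_congr _ _ P _ P [] (fun x hx => hx) (by simp)
  intro x hx y hy
  rcases lt_trichotomy x.1 y.1 with hlt | heq | hgt
  · simp [hlt]
  · have hxy : x = y := hinj x hx y hy heq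
    subst hxy
    simp
  · have h1 : ¬ x.1 < y.1 := lt_asymm hgt
    simp [h1, hgt]

theorem pv_sorted_bridge {α : Type} (xs : List α) (key : α → List Char) :
    PySem.List.sorted xs key
      = @PySem.List.sorted α (List Char) _ LinearOrder.toDecidableLT xs key false := by
  unfold PySem.List.sorted
  have hb : (fun a b => @decide (key a < key b) ((key a).decidableLT (key b)))
      = (fun a b => @decide (key a < key b) (LinearOrder.toDecidableLT (key a) (key b))) := by
    funext a b
    exact decide_eq_decide.mpr Iff.rfl
  simp only [if_neg (by decide : ¬ (false = true))]
  rw [hb]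

theorem pv_key_inj (l : List Char) (n : Nat) (hn : n ≤ l.length) :
    ∀ i ∈ (List.range n).map (fun k : Nat => (k : Int)),
    ∀ j ∈ (List.range n).map (fun k : Nat => (k : Int)),
      PySem.List.slice l (some i) none = PySem.List.slice l (some j) none → i = j := by
  intro i hi j hj hk
  simp only [List.mem_map, List.mem_range] at hi hj
  obtain ⟨a, ha, rfl⟩ := hi
  obtain ⟨b, hb, rfl⟩ := hj
  rw [PySem.List.slice_from_natCast, PySem.List.slice_from_natCast] at hk
  have := congrArg List.length hk
  simp only [List.length_drop] at this
  have : a = b := by omega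
  exact congrArg _ this

theorem pv_R_nodup (n : Nat) : ((List.range n).map (fun k : Nat => (k : Int))).Nodup :=
  List.Nodup.map (fun _ _ h => Int.natCast_inj.mp h) List.nodup_range

theorem pv_sa_pairwise (l : List Char) (n : Nat) (hn : n ≤ l.length) :
    (PySem.List.sorted ((List.range n).map (fun k : Nat => (k : Int)))
        (fun i => PySem.List.slice l (some i) none)).Pairwise
      (fun a b => PySem.List.slice l (some a) none < PySem.List.slice l (some b) none) := by
  rw [pv_sorted_bridge]
  have hle := PySem.List.sorted_pairwise ((List.range n).map (fun k : Nat => (k : Int)))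
      (fun i => PySem.List.slice l (some i) none)
  have hperm := @PySem.List.sorted_perm Int (List Char) _ LinearOrder.toDecidableLT
      ((List.range n).map (fun k : Nat => (k : Int)))
      (fun i => PySem.List.slice l (some i) none) false
  have hnd := hperm.symm.nodup (pv_R_nodup n)
  refine (hle.and hnd).imp_of_mem ?_
  intro a b hma hmb hab
  exact lt_of_le_of_ne hab.1 (fun he => hab.2 (pv_key_inj l n hn a (hperm.subset hma) b (hperm.subset hmb) he))

theorem pv_suffixes_eq (l : List Char) (n : Nat) (hn : n ≤ l.length) :
    PySem.List.sorted2
        (((List.range n).map (fun k : Nat => (k : Int))).map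
          (fun i => (PySem.List.slice l (some i) none, i)))
        (fun p => p.1) (fun p => p.2)
      = (PySem.List.sorted ((List.range n).map (fun k : Nat => (k : Int)))
          (fun i => PySem.List.slice l (some i) none)).map
          (fun i => (PySem.List.slice l (some i) none, i)) := by
  have hinj : ∀ x ∈ ((List.range n).map (fun k : Nat => (k : Int))).map
      (fun i => (PySem.List.slice l (some i) none, i)),
      ∀ y ∈ ((List.range n).map (fun k : Nat => (k : Int))).map
      (fun i => (PySem.List.slice l (some i) none, i)), x.1 = y.1 → x = y := by
    intro x hx y hy hxy
    obtain ⟨i, hi, rfl⟩ := List.mem_map.mp hx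
    obtain ⟨j, hj, rfl⟩ := List.mem_map.mp hy
    have : i = j := pv_key_inj l n hn i hi j hj hxy
    rw [this]
  rw [pv_sorted2_eq_sorted_fst _ hinj]
  rw [pv_sorted_bridge]
  apply PySem.List.sorted_eq_of_perm_of_pairwise_lt
  · exact (PySem.List.sorted_perm _ _ false).map _
  · rw [List.pairwise_map]
    exact pv_sa_pairwise l n hn

theorem pv_lcpIdx_eq (l : List Char) (a b k : Nat) :
    pvLcpIdx l a b k = k + pvLcpChars (l.drop (a + k)) (l.drop (b + k)) := by
  induction k using pvLcpIdx.induct (l := l) (a := a) (b := b) with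
  | case1 k h he ih =>
    rw [pvLcpIdx, dif_pos h, if_pos he, ih]
    rw [List.drop_eq_getElem_cons h.1, List.drop_eq_getElem_cons h.2]
    simp only [pvLcpChars, if_pos he]
    have h1 : a + (k + 1) = a + k + 1 := by omega
    have h2 : b + (k + 1) = b + k + 1 := by omega
    rw [h1, h2]
    omega
  | case2 k h he =>
    rw [pvLcpIdx, dif_pos h, if_neg he]
    rw [List.drop_eq_getElem_cons h.1, List.drop_eq_getElem_cons h.2]
    simp only [pvLcpChars, if_neg he]
    omega
  | case3 k h =>
    rw [pvLcpIdx, dif_neg h]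
    rcases not_and_or.mp h with h' | h'
    · rw [List.drop_eq_nil_of_le (by omega)]
      cases l.drop (b + k) <;> simp [pvLcpChars]
    · rw [List.drop_eq_nil_of_le (i := b + k) (by omega)]
      cases l.drop (a + k) <;> simp [pvLcpChars]

-- basic facts about pvLcpChars
theorem pv_lcpChars_comm (xs ys : List Char) : pvLcpChars xs ys = pvLcpChars ys xs := by
  induction xs generalizing ys with
  | nil => cases ys <;> simp [pvLcpChars]
  | cons x xs ih =>
    cases ys with
    | nil => simp [pvLcpChars]
    | cons y ys =>
      by_cases h : x = y
      · subst h; simp [pvLcpChars, ih]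
      · simp [pvLcpChars, h, Ne.symm h]

theorem pv_lcpChars_le (xs ys : List Char) : pvLcpChars xs ys ≤ xs.length := by
  induction xs generalizing ys with
  | nil => cases ys <;> simp [pvLcpChars]
  | cons x xs ih =>
    cases ys with
    | nil => simp [pvLcpChars]
    | cons y ys =>
      by_cases h : x = y
      · subst h; simp [pvLcpChars]; exact ih ys
      · simp [pvLcpChars, h]

theorem pv_lcpChars_drop (k : Nat) : ∀ (xs ys : List Char), k ≤ pvLcpChars xs ys →
    pvLcpChars xs ys = k + pvLcpChars (xs.drop k) (ys.drop k) := by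
  induction k with
  | zero => intro xs ys _; simp
  | succ k ih =>
    intro xs ys h
    cases xs with
    | nil => simp [pvLcpChars] at h
    | cons x xs =>
      cases ys with
      | nil => simp [pvLcpChars] at h
      | cons y ys =>
        by_cases he : x = y
        · subst he
          have hx : pvLcpChars (x :: xs) (x :: ys) = pvLcpChars xs ys + 1 := by
            simp [pvLcpChars]
          rw [hx] at h
          have hk : k ≤ pvLcpChars xs ys := by omega
          rw [hx, List.drop_succ_cons, List.drop_succ_cons, ih xs ys hk]
          omega
        · simp [pvLcpChars, he] at h

theorem pv_lcpIdx_start (l : List Char) (a b k : Nat) (h : k ≤ pvLcpIdx l a b 0) :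
    pvLcpIdx l a b k = pvLcpIdx l a b 0 := by
  have e0 := pv_lcpIdx_eq l a b 0
  have ek := pv_lcpIdx_eq l a b k
  simp only [Nat.add_zero] at e0
  have hk : k ≤ pvLcpChars (l.drop a) (l.drop b) := by omega
  have hd := pv_lcpChars_drop k (l.drop a) (l.drop b) hk
  rw [List.drop_drop, List.drop_drop] at hd
  omega

theorem pv_lcp_squeeze (a b c : List Char) (h1 : a ≤ b) (h2 : b ≤ c) :
    pvLcpChars a c ≤ pvLcpChars b c := by
  induction c generalizing a b with
  | nil => cases a <;> simp [pvLcpChars]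
  | cons z cs ih =>
    cases a with
    | nil => simp [pvLcpChars]
    | cons x as =>
      by_cases hxz : x = z
      · subst hxz
        cases b with
        | nil =>
          exfalso
          have hlt : ([] : List Char) < x :: as := List.nil_lt_cons x as
          exact List.not_lt_nil ([] : List Char) (lt_of_lt_of_le hlt h1)
        | cons y bs =>
          have h1' : x < y ∨ (x = y ∧ as ≤ bs) := by
            rcases lt_or_eq_of_le h1 with hlt | heq
            · rcases List.cons_lt_cons_iff.mp hlt with h | ⟨rfl, h⟩
              · exact Or.inl h
              · exact Or.inr ⟨rfl, le_of_lt h⟩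
            · injection heq with e1 e2; exact Or.inr ⟨e1, le_of_eq e2⟩
          have h2' : y < x ∨ (y = x ∧ bs ≤ cs) := by
            rcases lt_or_eq_of_le h2 with hlt | heq
            · rcases List.cons_lt_cons_iff.mp hlt with h | ⟨rfl, h⟩
              · exact Or.inl h
              · exact Or.inr ⟨rfl, le_of_lt h⟩
            · injection heq with e1 e2; exact Or.inr ⟨e1, le_of_eq e2⟩
          rcases h1' with h1' | ⟨rfl, h1'⟩
          · rcases h2' with h2' | ⟨rfl, _⟩
            · exact absurd (lt_trans h1' h2') (lt_irrefl _)
            · exact absurd h1' (lt_irrefl _)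
          · simp only [pvLcpChars, if_true]
            rcases h2' with h2' | ⟨_, h2'⟩
            · exact absurd h2' (lt_irrefl _)
            · exact Nat.succ_le_succ (ih as bs h1' h2')
      · simp [pvLcpChars, hxz]

-- rank-array construction
theorem pv_setfold_frame (xs : List (Int × Int)) (init : List Int) (k : Nat)
    (hk : ∀ p ∈ xs, 0 ≤ p.2 ∧ p.2.toNat ≠ k) :
    (xs.foldl (fun rk p => PySem.List.pySetD rk p.2 p.1) init).getD k 0 = init.getD k 0 := by
  induction xs generalizing init with
  | nil => rfl
  | cons x xs ih =>
    obtain ⟨h0, hne⟩ := hk x (by simp)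
    rw [List.foldl_cons, ih _ (fun p hp => hk p (by simp [hp])),
      PySem.List.pySetD_of_nonneg _ _ h0]
    rcases Nat.lt_or_ge x.2.toNat init.length with hlt | hge
    · rw [List.getD, List.getD, List.getElem?_set_ne (by omega)]
    · rw [List.set_eq_of_length_le (by omega)]

theorem pv_setfold_spec (xs : List Int) :
    ∀ (s : Int) (init : List Int), xs.Nodup →
    (∀ x ∈ xs, 0 ≤ x ∧ x.toNat < init.length) →
    ∀ (ρ : Nat) (hρ : ρ < xs.length),
    ((PySem.List.enumerate xs s).foldl (fun rk (p : Int × Int) => PySem.List.pySetD rk p.2 p.1)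
        init).getD (xs[ρ]).toNat 0 = s + ρ := by
  induction xs with
  | nil => intro s init _ _ ρ hρ; simp at hρ
  | cons x xs ih =>
    intro s init hnd hmem ρ hρ
    rw [PySem.List.enumerate_cons, List.foldl_cons]
    have hx := hmem x (by simp)
    cases ρ with
    | zero =>
      simp only [List.getElem_cons_zero]
      rw [pv_setfold_frame _ _ _ (fun p hp => by
        obtain ⟨k, hk, rfl⟩ := (PySem.List.mem_enumerate_iff _ _ _).mp hp
        have hmx : xs[k] ∈ xs := List.getElem_mem hk
        have hxk := hmem xs[k] (by simp [hmx])
        refine ⟨hxk.1, fun he => ?_⟩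
        have : xs[k] = x := by omega
        exact (List.nodup_cons.mp hnd).1 (this ▸ hmx))]
      rw [PySem.List.pySetD_of_nonneg _ _ hx.1, List.getD, List.getElem?_set_self (by omega)]
      simp
    | succ ρ =>
      simp only [List.getElem_cons_succ]
      rw [ih (s + 1) (PySem.List.pySetD init x s) (List.nodup_cons.mp hnd).2
        (fun y hy => ⟨(hmem y (by simp [hy])).1, by
          rw [PySem.List.pySetD_of_nonneg _ _ hx.1, List.length_set]
          exact (hmem y (by simp [hy])).2⟩)
        ρ (by simpa using Nat.lt_of_succ_lt_succ hρ)]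
      push_cast
      ring

-- Kasai's algorithm: proof-side Nat-level step and invariant
def pvKasaiStep (l : List Char) (sa R : List Int) (st : List Int × Int) (m : Nat) : List Int × Int :=
  let r := R.getD m 0
  if r > 0 then
    let j := PySem.List.pyGetD sa (r - 1) 0
    let h : Int := (pvLcpIdx l m j.toNat st.2.toNat : Nat)
    (PySem.List.pySetD st.1 r h, if h ≠ 0 then h - 1 else h)
  else (st.1, 0)

def pvKInv (l : List Char) (sa : List Int) (m : Nat) (st : List Int × Int) : Prop :=
  st.1.length = l.length ∧ 0 ≤ st.2 ∧
  (∀ ρ : Nat, 1 ≤ ρ → ρ < sa.length → (sa.getD ρ 0).toNat < m →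
    st.1.getD ρ 0 = ((pvLcpIdx l (sa.getD (ρ - 1) 0).toNat (sa.getD ρ 0).toNat 0 : Nat) : Int)) ∧
  (∀ ρ : Nat, 1 ≤ ρ → ρ < sa.length → sa.getD ρ 0 = (m : Int) →
    st.2.toNat ≤ pvLcpIdx l (sa.getD (ρ - 1) 0).toNat m 0)

-- the suffix array facts used by Kasai
def pvSAGood (l : List Char) (sa : List Int) : Prop :=
  sa.length = l.length ∧
  (∀ ρ : Nat, ρ < sa.length → 0 ≤ sa.getD ρ 0 ∧ (sa.getD ρ 0).toNat < l.length) ∧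
  (∀ m : Nat, m < l.length → ∃ ρ : Nat, ρ < sa.length ∧ sa.getD ρ 0 = (m : Int)) ∧
  (∀ p q : Nat, p < q → q < sa.length →
    l.drop (sa.getD p 0).toNat < l.drop (sa.getD q 0).toNat)

theorem pv_sa_len (l : List Char) : (pvSuffArr l).length = l.length := by
  unfold pvSuffArr
  rw [PySem.List.length_sorted, List.length_map, List.length_range]

theorem pv_suffarr_good (l : List Char) : pvSAGood l (pvSuffArr l) := by
  have hlen := pv_sa_len l
  have hperm : (pvSuffArr l).Perm ((List.range l.length).map (fun k : Nat => (k : Int))) :=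
    PySem.List.sorted_perm _ _ _
  have hent : ∀ ρ : Nat, ρ < (pvSuffArr l).length →
      0 ≤ (pvSuffArr l).getD ρ 0 ∧ ((pvSuffArr l).getD ρ 0).toNat < l.length := by
    intro ρ hρ
    rw [List.getD_eq_getElem _ 0 hρ]
    have hm : (pvSuffArr l)[ρ] ∈ pvSuffArr l := List.getElem_mem hρ
    obtain ⟨k, hk, he⟩ := List.mem_map.mp (hperm.subset hm)
    rw [List.mem_range] at hk
    constructor
    · rw [← he]; positivity
    · rw [← he]; simpa using hk
  refine ⟨hlen, hent, ?_, ?_⟩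
  · intro m hm
    have : (m : Int) ∈ pvSuffArr l := hperm.mem_iff.mpr (by
      exact List.mem_map.mpr ⟨m, List.mem_range.mpr hm, rfl⟩)
    obtain ⟨ρ, hρ, he⟩ := List.mem_iff_getElem.mp this
    exact ⟨ρ, hρ, by rw [List.getD_eq_getElem _ 0 hρ, he]⟩
  · intro p q hpq hq
    have hpw : (pvSuffArr l).Pairwise (fun a b =>
        PySem.List.slice l (some a) none < PySem.List.slice l (some b) none) := by
      unfold pvSuffArr
      exact pv_sa_pairwise l l.length le_rfl
    have hpw' := (List.pairwise_iff_getElem.mp hpw) p q (by omega) hq hpq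
    have hp : p < (pvSuffArr l).length := by omega
    rw [List.getD_eq_getElem _ 0 hp, List.getD_eq_getElem _ 0 hq]
    have h1 := (hent p hp).1
    have h2 := (hent q hq).1
    rw [List.getD_eq_getElem _ 0 hp] at h1
    rw [List.getD_eq_getElem _ 0 hq] at h2
    rw [← PySem.List.slice_from _ h1, ← PySem.List.slice_from _ h2]
    exact hpw'

theorem pv_lcpIdx_comm (l : List Char) (a b k : Nat) :
    pvLcpIdx l a b k = pvLcpIdx l b a k := by
  rw [pv_lcpIdx_eq, pv_lcpIdx_eq, pv_lcpChars_comm]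

theorem pv_sa_getD_inj (l : List Char) (sa : List Int) (hsa : pvSAGood l sa)
    (p q : Nat) (hp : p < sa.length) (hq : q < sa.length)
    (he : sa.getD p 0 = sa.getD q 0) : p = q := by
  rcases lt_trichotomy p q with h | h | h
  · have := hsa.2.2.2 p q h hq
    rw [he] at this
    exact absurd this (lt_irrefl _)
  · exact h
  · have := hsa.2.2.2 q p h hp
    rw [he] at this
    exact absurd this (lt_irrefl _)

theorem pv_kasai_key (l : List Char) (sa : List Int) (hsa : pvSAGood l sa)
    (j m : Nat) (hj : j < l.length) (hm : m < l.length)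
    (hjm : l.drop j < l.drop m) (hH : 1 ≤ pvLcpIdx l j m 0)
    (ρ' : Nat) (hρ'1 : 1 ≤ ρ') (hρ' : ρ' < sa.length)
    (hsaρ' : sa.getD ρ' 0 = ((m + 1 : Nat) : Int)) :
    pvLcpIdx l j m 0 - 1 ≤ pvLcpIdx l (sa.getD (ρ' - 1) 0).toNat (m + 1) 0 := by
  have eH : pvLcpIdx l j m 0 = pvLcpChars (l.drop j) (l.drop m) := by
    rw [pv_lcpIdx_eq]; simp
  by_cases hj1 : j + 1 < l.length
  case neg =>
    -- the predecessor suffix has length ≤ 1, so lcp - 1 = 0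
    have := pv_lcpChars_le (l.drop j) (l.drop m)
    rw [List.length_drop] at this
    omega
  case pos =>
  -- drop the shared first character
  have hH' : 1 ≤ pvLcpChars (l.drop j) (l.drop m) := by omega
  have hstep := pv_lcpChars_drop 1 (l.drop j) (l.drop m) hH'
  rw [List.drop_drop, List.drop_drop] at hstep
  -- heads are equal, so the tails stay lex-ordered
  have hdj := List.drop_eq_getElem_cons hj
  have hdm := List.drop_eq_getElem_cons hm
  have hheads : l[j] = l[m] := by
    by_contra hne
    rw [hdj, hdm] at hH'
    simp [pvLcpChars, hne] at hH'
  have htail : l.drop (j + 1) < l.drop (m + 1) := by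
    rw [hdj, hdm, hheads] at hjm
    rcases List.cons_lt_cons_iff.mp hjm with h | ⟨_, h⟩
    · exact absurd h (lt_irrefl _)
    · exact h
  -- rank of j + 1 in the suffix array
  obtain ⟨p, hp, hsap⟩ := hsa.2.2.1 (j + 1) hj1
  have hjm' : j ≠ m := fun he => absurd (he ▸ hjm) (lt_irrefl _)
  have hpρ' : p < ρ' := by
    rcases lt_trichotomy p ρ' with h | h | h
    · exact h
    · exfalso
      rw [h, hsaρ'] at hsap
      have : m + 1 = j + 1 := by exact_mod_cast hsap
      omega
    · exfalso
      have := hsa.2.2.2 ρ' p h hp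
      rw [hsap, hsaρ'] at this
      simp only [Int.toNat_natCast] at this
      exact absurd (lt_trans htail this) (lt_irrefl _)
  -- squeeze through the immediate predecessor
  have hρ'1lt : ρ' - 1 < sa.length := by omega
  have hable : l.drop (j + 1) ≤ l.drop (sa.getD (ρ' - 1) 0).toNat := by
    rcases Nat.lt_or_ge p (ρ' - 1) with h | h
    · exact le_of_lt (by
        have := hsa.2.2.2 p (ρ' - 1) h hρ'1lt
        rw [hsap] at this
        simpa using this)
    · have hpe : p = ρ' - 1 := by omega
      rw [← hpe, hsap]
      simp
  have hble : l.drop (sa.getD (ρ' - 1) 0).toNat ≤ l.drop (m + 1) := by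
    have := hsa.2.2.2 (ρ' - 1) ρ' (by omega) hρ'
    rw [hsaρ'] at this
    exact le_of_lt (by simpa using this)
  have hsq := pv_lcp_squeeze _ _ _ hable hble
  have eG : pvLcpIdx l (sa.getD (ρ' - 1) 0).toNat (m + 1) 0
      = pvLcpChars (l.drop (sa.getD (ρ' - 1) 0).toNat) (l.drop (m + 1)) := by
    rw [pv_lcpIdx_eq]; simp
  omega

theorem pv_kasai (l : List Char) (sa : List Int) (hsa : pvSAGood l sa) (R : List Int)
    (hR : ∀ m : Nat, m < l.length → ∀ ρ : Nat, ρ < sa.length → sa.getD ρ 0 = (m : Int) →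
      R.getD m 0 = (ρ : Int)) :
    pvKInv l sa l.length
      ((List.range l.length).foldl (pvKasaiStep l sa R) (List.replicate l.length 0, 0)) := by
  suffices h : ∀ M : Nat, M ≤ l.length →
      pvKInv l sa M ((List.range M).foldl (pvKasaiStep l sa R) (List.replicate l.length 0, 0)) from
    h l.length le_rfl
  intro M
  induction M with
  | zero =>
    intro _
    exact ⟨by simp, le_rfl, fun ρ _ _ h => absurd h (by omega), fun ρ _ _ _ => by simp⟩
  | succ M ihM =>
    intro hM1
    have hM : M < l.length := by omega
    rw [List.range_succ, List.foldl_append, List.foldl_cons, List.foldl_nil]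
    obtain ⟨hlen, hnn, hc, hd⟩ := ihM (by omega)
    set st := (List.range M).foldl (pvKasaiStep l sa R) (List.replicate l.length 0, 0) with hstdef
    obtain ⟨ρM, hρM, hsaρM⟩ := hsa.2.2.1 M hM
    have hrM : R.getD M 0 = (ρM : Int) := hR M hM ρM hρM hsaρM
    unfold pvKasaiStep
    rw [hrM]
    by_cases hρM0 : ρM = 0
    · subst hρM0
      rw [if_neg (by simp)]
      refine ⟨hlen, le_rfl, ?_, ?_⟩
      · intro ρ hρ1 hρlen htrig
        rcases Nat.lt_or_ge (sa.getD ρ 0).toNat M with h | h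
        · exact hc ρ hρ1 hρlen h
        · exfalso
          have hb := (hsa.2.1 ρ hρlen).1
          have hEq : sa.getD ρ 0 = (M : Int) := by omega
          have := pv_sa_getD_inj l sa hsa ρ 0 hρlen hρM (hEq.trans hsaρM.symm)
          omega
      · intro ρ _ _ _
        simp
    · have hρM1 : 1 ≤ ρM := by omega
      rw [if_pos (by exact_mod_cast Nat.pos_of_ne_zero hρM0)]
      have hcast : (ρM : Int) - 1 = ((ρM - 1 : Nat) : Int) := by omega
      rw [hcast, PySem.List.pyGetD_natCast]
      set j := sa.getD (ρM - 1) 0 with hjdef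
      have hjb := hsa.2.1 (ρM - 1) (by omega)
      have hdM := hd ρM hρM1 hρM hsaρM
      have hHeq : pvLcpIdx l M j.toNat st.2.toNat
          = pvLcpIdx l j.toNat M 0 := by
        rw [pv_lcpIdx_comm l M j.toNat,
          pv_lcpIdx_start l j.toNat M st.2.toNat hdM]
      simp only [hHeq]
      set H := pvLcpIdx l j.toNat M 0 with hHdef
      have hsetlen : (PySem.List.pySetD st.1 (ρM : Int) ((H : Nat) : Int)).length = st.1.length := by
        rw [PySem.List.pySetD_natCast, List.length_set]
      refine ⟨by rw [hsetlen]; exact hlen, by split_ifs <;> omega, ?_, ?_⟩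
      · intro ρ hρ1 hρlen htrig
        simp only [PySem.List.pySetD_natCast]
        by_cases hρeq : ρ = ρM
        · subst hρeq
          rw [List.getD, List.getElem?_set_self (by rw [hlen, ← hsa.1]; omega)]
          rw [hsaρM]
          rfl
        · rw [List.getD, List.getElem?_set_ne (fun he => hρeq he.symm), ← List.getD]
          rcases Nat.lt_or_ge (sa.getD ρ 0).toNat M with h | h
          · exact hc ρ hρ1 hρlen h
          · exfalso
            have hb := (hsa.2.1 ρ hρlen).1
            have hEq : sa.getD ρ 0 = (M : Int) := by omega
            exact hρeq (pv_sa_getD_inj l sa hsa ρ ρM hρlen hρM (hEq.trans hsaρM.symm))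
      · intro ρ hρ1 hρlen hsaρ
        by_cases hH0 : H = 0
        · rw [hH0]
          simp
        · have hH1 : 1 ≤ H := by omega
          have hjm : l.drop j.toNat < l.drop M := by
            have := hsa.2.2.2 (ρM - 1) ρM (by omega) hρM
            rw [hsaρM] at this
            simpa using this
          have hkey := pv_kasai_key l sa hsa j.toNat M hjb.2 hM hjm hH1 ρ hρ1 hρlen hsaρ
          have hne : ((H : Nat) : Int) ≠ 0 := by omega
          rw [if_pos hne]
          have hto : (((H : Nat) : Int) - 1).toNat = H - 1 := by omega
          rw [hto]
          exact hkey

-- bridges between fold shapes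
theorem pv_adj_map {α : Type} (L : List α) (d : α) :
    (List.range (L.length - 1)).map (fun k => (L.getD k d, L.getD (k + 1) d))
      = L.zip L.tail := by
  induction L with
  | nil => simp
  | cons x xs ih =>
    cases xs with
    | nil => simp
    | cons y ys =>
      rw [show (x :: y :: ys : List α).length - 1 = ((y :: ys : List α).length - 1) + 1 by simp]
      rw [List.range_succ_eq_map]
      simp only [List.map_cons, List.map_map, Function.comp_def]
      simp only [List.getD_cons_succ, List.getD_cons_zero, Nat.succ_eq_add_one]
      show ((x,y) :: List.map (fun k => ((y :: ys).getD k d, (y :: ys).getD (k+1) d)) (List.range ((y :: ys).length - 1)) : List (α × α)) = (x :: y :: ys).zip (y :: ys)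
      rw [List.zip_cons_cons]
      simpa using ih

theorem pv_adj_fold {α β : Type} (L : List α) (d : α) (g : β → α → α → β) (init : β) :
    (List.range (L.length - 1)).foldl (fun st k => g st (L.getD k d) (L.getD (k + 1) d)) init
      = (L.zip L.tail).foldl (fun st p => g st p.1 p.2) init := by
  rw [← pv_adj_map L d, List.foldl_map]

theorem pv_fold_pairs (l : List Char) (sa : List Int) (init : Int × List Char) :
    ((sa.map (fun i => (PySem.List.slice l (some i) none, i))).zip
        (sa.map (fun i => (PySem.List.slice l (some i) none, i))).tail).foldl
      (fun st p => if min ((pvLcpChars p.1.1 p.2.1 : Nat) : Int) |p.1.2 - p.2.2| > st.1 then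
          (min ((pvLcpChars p.1.1 p.2.1 : Nat) : Int) |p.1.2 - p.2.2|,
            PySem.List.slice l (some (min p.1.2 p.2.2))
              (some (min p.1.2 p.2.2 + min ((pvLcpChars p.1.1 p.2.1 : Nat) : Int) |p.1.2 - p.2.2|)))
        else st) init
      = (sa.zip sa.tail).foldl (pvStepA l) init := by
  rw [← List.map_tail, List.zip_map, List.foldl_map]
  rfl

theorem pv_step_corr (l : List Char) (p : Int × Int)
    (hp : 0 ≤ p.1 ∧ p.1 < (l.length : Int) ∧ 0 ≤ p.2 ∧ p.2 < (l.length : Int))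
    (stA : Int × List Char) (stB : Int × Int) (h : pvInv l stA stB) :
    pvInv l (pvStepA l stA p) (pvStepB l stB p) := by
  obtain ⟨h1, h2, h3⟩ := h
  obtain ⟨hp1, hp1', hp2, hp2'⟩ := hp
  have hs1 : PySem.List.slice l (some p.1) none = l.drop p.1.toNat :=
    PySem.List.slice_from l hp1
  have hs2 : PySem.List.slice l (some p.2) none = l.drop p.2.toNat :=
    PySem.List.slice_from l hp2
  have hlcp : ((pvLcpChars (PySem.List.slice l (some p.1) none)
      (PySem.List.slice l (some p.2) none) : Nat) : Int)
      = ((pvLcpIdx l p.1.toNat p.2.toNat 0 : Nat) : Int) := by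
    rw [hs1, hs2, pv_lcpIdx_eq]
    simp
  unfold pvStepA pvStepB
  simp only [hlcp, h1]
  set v := min ((pvLcpIdx l p.1.toNat p.2.toNat 0 : Nat) : Int) |p.1 - p.2| with hv
  by_cases hgt : v > stB.1
  · rw [if_pos hgt, if_pos hgt]
    have hv0 : 0 < v := lt_of_le_of_lt h2 hgt
    have hvd : v ≤ |p.1 - p.2| := min_le_right _ _
    have habs : |p.1 - p.2| = max p.1 p.2 - min p.1 p.2 := by
      rcases le_total p.1 p.2 with hle | hle
      · rw [max_eq_right hle, min_eq_left hle, abs_sub_comm, abs_of_nonneg (by omega)]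
      · rw [max_eq_left hle, min_eq_right hle, abs_of_nonneg (by omega)]
    refine ⟨rfl, le_of_lt hv0, fun _ => ⟨?_, ?_, ?_⟩⟩
    · simp only []
      exact le_min hp1 hp2
    · simp only []
      have : max p.1 p.2 ≤ (l.length : Int) := by
        rcases le_total p.1 p.2 with hle | hle
        · rw [max_eq_right hle]; omega
        · rw [max_eq_left hle]; omega
      omega
    · simp only []
      rw [PySem.List.slice_toNat l (le_min hp1 hp2) (by positivity)]
      congr 1
      have h0 : 0 ≤ min p.1 p.2 := le_min hp1 hp2
      omega
  · rw [if_neg hgt, if_neg hgt]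
    exact ⟨h1, h2, h3⟩

theorem pv_fold_corr (l : List Char) :
    ∀ (ps : List (Int × Int)),
    (∀ p ∈ ps, 0 ≤ p.1 ∧ p.1 < (l.length : Int) ∧ 0 ≤ p.2 ∧ p.2 < (l.length : Int)) →
    ∀ (stA : Int × List Char) (stB : Int × Int), pvInv l stA stB →
    pvInv l (ps.foldl (pvStepA l) stA) (ps.foldl (pvStepB l) stB) := by
  intro ps
  induction ps with
  | nil => intro _ stA stB h; exact h
  | cons p ps ih =>
    intro hmem stA stB h
    exact ih (fun q hq => hmem q (by simp [hq]))
      _ _ (pv_step_corr l p (hmem p (by simp)) stA stB h)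

theorem pv_countP_or_disjoint (p q : Nat → Bool) (l : List Nat)
    (h : ∀ a ∈ l, ¬(p a = true ∧ q a = true)) :
    l.countP (fun a => p a || q a) = l.countP p + l.countP q := by
  induction l with
  | nil => simp
  | cons x xs ih =>
    have hx := h x (by simp)
    rw [List.countP_cons, List.countP_cons, List.countP_cons,
      ih (fun a ha => h a (by simp [ha]))]
    cases hp : p x <;> cases hq : q x <;> simp_all <;> omega

theorem pv_count_one (m n : Nat) (hm : m < n) :
    (List.range n).countP (fun j => decide (j = m)) = 1 := by
  have hfn : (fun j : Nat => decide (j = m)) = (fun j : Nat => j == m) := by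
    funext j; by_cases h : j = m <;> simp [h]
  rw [hfn, show (List.range n).countP (fun j => j == m) = (List.range n).count m from rfl]
  exact List.count_eq_one_of_mem List.nodup_range (by simpa using hm)

theorem pv_countOvAux_eq (hay nd : List Char) (hnd : nd ≠ []) :
    ∀ (fuel i : Nat) (c : Int), i ≤ hay.length → hay.length + 1 ≤ fuel + i →
    pvCountOvAux hay nd fuel i c
      = c + ((List.range hay.length).countP
          (fun j => decide (i ≤ j) && decide (nd <+: hay.drop j)) : Int) := by
  intro fuel
  induction fuel with
  | zero => intro i c hi hfuel; omega
  | succ fuel ih =>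
    intro i c hi hfuel
    by_cases hf : PySem.Chars.findFrom hay nd (i : Int) none = -1
    · rw [show pvCountOvAux hay nd (fuel + 1) i c
        = if PySem.Chars.findFrom hay nd (i : Int) none = -1 then c
          else pvCountOvAux hay nd fuel ((PySem.Chars.findFrom hay nd (i : Int) none).toNat + 1) (c + 1) from rfl,
        if_pos hf]
      have hnin := (PySem.Chars.findFrom_natCast_eq_neg_one_iff hay nd i hi).mp hf
      have hz : (List.range hay.length).countP
          (fun j => decide (i ≤ j) && decide (nd <+: hay.drop j)) = 0 := by
        rw [List.countP_eq_zero]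
        intro j _
        simp only [Bool.and_eq_true, decide_eq_true_eq, not_and]
        intro hij hpre
        have hdd : hay.drop j = (hay.drop i).drop (j - i) := by
          rw [List.drop_drop]; congr 1; omega
        rw [hdd] at hpre
        exact hnin ((PySem.Chars.isIn_iff_infix nd (hay.drop i)).mp
          ((PySem.Chars.exists_prefix_drop_iff_isIn nd (hay.drop i)).mp ⟨_, hpre⟩))
      rw [hz]; simp
    · obtain ⟨hge, hpre, hmin⟩ := PySem.Chars.findFrom_natCast_spec hay nd i hi hf
      set f := PySem.Chars.findFrom hay nd (i : Int) none with hfdef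
      have hf0 : 0 ≤ f := le_trans (Int.natCast_nonneg i) hge
      have hmi : (f.toNat : Int) = f := Int.toNat_of_nonneg hf0
      have him : i ≤ f.toNat := by
        have := hge; omega
      have hnd0 : 0 < nd.length := List.length_pos_of_ne_nil hnd
      have hdlen := hpre.length_le
      rw [List.length_drop] at hdlen
      have hmlen : f.toNat < hay.length := by omega
      rw [show pvCountOvAux hay nd (fuel + 1) i c
        = if f = -1 then c else pvCountOvAux hay nd fuel (f.toNat + 1) (c + 1) from rfl,
        if_neg hf]
      rw [ih (f.toNat + 1) (c + 1) (by omega) (by omega)]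
      have hcong : ∀ a ∈ List.range hay.length,
          (fun j => decide (i ≤ j) && decide (nd <+: hay.drop j)) a
            = (fun j => decide (j = f.toNat)
                || (decide (f.toNat + 1 ≤ j) && decide (nd <+: hay.drop j))) a := by
        intro a _
        by_cases ham : a = f.toNat
        · subst ham
          simp [him, hpre]
        · by_cases hal : a < f.toNat
          · by_cases hia : i ≤ a
            · have : ¬ nd <+: hay.drop a := hmin a hia hal
              simp [this, ham]
            · have h3 : ¬ f.toNat + 1 ≤ a := by omega
              simp [hia, ham, h3]
          · have h1 : i ≤ a := by omega
            have h2 : f.toNat + 1 ≤ a := by omega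
            simp [h1, h2, ham]
      have hPQ := List.countP_congr
        (p := fun j => decide (i ≤ j) && decide (nd <+: hay.drop j))
        (q := fun j => decide (j = f.toNat) || (decide (f.toNat + 1 ≤ j) && decide (nd <+: hay.drop j)))
        (l := List.range hay.length) (fun a ha => by rw [hcong a ha])
      rw [hPQ]
      rw [pv_countP_or_disjoint _ _ _ (by
        intro a _ hcontra
        simp only [decide_eq_true_eq, Bool.and_eq_true] at hcontra
        omega)]
      rw [pv_count_one f.toNat hay.length hmlen]
      push_cast
      ring

theorem pv_count_final (l : List Char) (s L : Int)
    (hs : 0 ≤ s) (hL : 0 < L) (hn : s + L ≤ (l.length : Int)) :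
    pvCountOverlapping l ((l.drop s.toNat).take L.toNat)
      = (List.range l.length).foldl (fun (x : Int) (y : Nat) =>
          x + if PySem.List.slice l (some (y : Int)) (some ((y : Int) + L))
              = PySem.List.slice l (some s) (some (s + L)) then 1 else 0) 0 := by
  have hlen : ((l.drop s.toNat).take L.toNat).length = L.toNat := by
    rw [List.length_take, List.length_drop]
    omega
  have hne : (l.drop s.toNat).take L.toNat ≠ [] := by
    intro h
    rw [h] at hlen
    simp at hlen
    omega
  have hsl : PySem.List.slice l (some s) (some (s + L)) = (l.drop s.toNat).take L.toNat := by
    rw [PySem.List.slice_toNat l hs (by omega)]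
    congr 1
    omega
  rw [pvCountOverlapping, if_neg hne,
    pv_countOvAux_eq l _ hne (l.length + 1) 0 0 (by omega) (by omega)]
  have hcl : ∀ j ∈ List.range l.length,
      (decide (0 ≤ j) && decide ((l.drop s.toNat).take L.toNat <+: l.drop j))
        = decide ((l.drop s.toNat).take L.toNat <+: l.drop j) := by
    intro j _
    simp
  have hb : ∀ (x : Int) (y : Nat),
      x + (if PySem.List.slice l (some (y : Int)) (some ((y : Int) + L))
          = PySem.List.slice l (some s) (some (s + L)) then (1 : Int) else 0)
        = if PySem.List.slice l (some (y : Int)) (some ((y : Int) + L))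
          = PySem.List.slice l (some s) (some (s + L)) then x + 1 else x := by
    intro x y
    split <;> ring
  simp only [hb]
  rw [PySem.List.foldl_ite_add_one
    (fun y : Nat => PySem.List.slice l (some (y : Int)) (some ((y : Int) + L))
      = PySem.List.slice l (some s) (some (s + L))) (List.range l.length) 0]
  have hcr : ∀ j ∈ List.range l.length,
      decide (PySem.List.slice l (some (j : Int)) (some ((j : Int) + L))
          = PySem.List.slice l (some s) (some (s + L)))
        = decide ((l.drop s.toNat).take L.toNat <+: l.drop j) := by
    intro j _
    have h1 : PySem.List.slice l (some (j : Int)) (some ((j : Int) + L))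
        = (l.drop j).take L.toNat := by
      rw [PySem.List.slice_toNat l (by positivity) (by omega)]
      congr 1
      omega
    rw [h1, hsl]
    apply decide_eq_decide.mpr
    rw [List.prefix_iff_eq_take, hlen, eq_comm]
  have hCl := List.countP_congr (l := List.range l.length)
    (p := fun j : Nat => decide (0 ≤ j) && decide ((l.drop s.toNat).take L.toNat <+: l.drop j))
    (q := fun j : Nat => decide ((l.drop s.toNat).take L.toNat <+: l.drop j))
    (fun a ha => by beta_reduce; rw [hcl a ha])
  have hCr := List.countP_congr (l := List.range l.length)
    (p := fun j : Nat => decide (PySem.List.slice l (some (j : Int)) (some ((j : Int) + L))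
        = PySem.List.slice l (some s) (some (s + L))))
    (q := fun j : Nat => decide ((l.drop s.toNat).take L.toNat <+: l.drop j))
    (fun a ha => by beta_reduce; rw [hcr a ha])
  rw [hCl, ← hCr]

-- A equals the canonical form
theorem pv_A_eq_canon (seq : String) : longest_duplicated_substring seq = pvCanon seq := by
  simp only [longest_duplicated_substring, pvCanon, pvSuffArr, PySem.List.len_eq]
  have hR : PySem.List.pyRange 0 ((seq.toList.length : Int)) 1
      = (List.range seq.toList.length).map (fun k : Nat => (k : Int)) := by
    rw [PySem.List.pyRange_one]
    simp
  have hR1 : PySem.List.pyRange 1 ((seq.toList.length : Int)) 1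
      = (List.range (seq.toList.length - 1)).map (fun k : Nat => 1 + (k : Int)) := by
    rw [PySem.List.pyRange_one]
    have h1 : ((seq.toList.length : Int) - 1).toNat = seq.toList.length - 1 := by omega
    rw [h1]
  simp only [hR, hR1, pv_suffixes_eq seq.toList seq.toList.length le_rfl]
  set sa := PySem.List.sorted ((List.range seq.toList.length).map (fun k : Nat => (k : Int)))
      (fun i => PySem.List.slice seq.toList (some i) none) with hsa
  have hc1 : ∀ k : Nat, ((k + 1 : Nat) : Int) - 1 = (k : Int) := by intro k; push_cast; ring
  have hc2 : ∀ k : Nat, (1 : Int) + (k : Int) = ((k + 1 : Nat) : Int) := by intro k; push_cast; ring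
  simp only [List.foldl_map, hc2, hc1, PySem.List.pyGetD_natCast]
  have hLlen : (List.map (fun i => (PySem.List.slice seq.toList (some i) none, i)) sa).length
      = seq.toList.length := by
    rw [List.length_map, hsa, PySem.List.length_sorted, List.length_map, List.length_range]
  rw [show seq.toList.length - 1
      = (List.map (fun i => (PySem.List.slice seq.toList (some i) none, i)) sa).length - 1
    from by rw [hLlen]]
  rw [pv_adj_fold (List.map (fun i => (PySem.List.slice seq.toList (some i) none, i)) sa)
    ([], 0)
    (fun st p1 p2 => if min ((pvLcpChars p1.1 p2.1 : Nat) : Int) |p1.2 - p2.2| > st.1 then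
        (min ((pvLcpChars p1.1 p2.1 : Nat) : Int) |p1.2 - p2.2|,
          PySem.List.slice seq.toList (some (min p1.2 p2.2))
            (some (min p1.2 p2.2 + min ((pvLcpChars p1.1 p2.1 : Nat) : Int) |p1.2 - p2.2|)))
      else st)
    ((0 : Int), ([] : List Char))]
  rw [pv_fold_pairs seq.toList sa ((0 : Int), ([] : List Char))]
  have hbounds : ∀ p ∈ sa.zip sa.tail,
      0 ≤ p.1 ∧ p.1 < (seq.toList.length : Int) ∧ 0 ≤ p.2 ∧ p.2 < (seq.toList.length : Int) := by
    intro p hp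
    have hsub : sa ⊆ (List.range seq.toList.length).map (fun k : Nat => (k : Int)) := by
      rw [hsa]
      exact (PySem.List.sorted_perm _ _ _).subset
    obtain ⟨a, b⟩ := p
    obtain ⟨h1, h2⟩ := List.of_mem_zip hp
    have h2' : b ∈ sa := List.mem_of_mem_tail h2
    obtain ⟨ka, hka, rfl⟩ := List.mem_map.mp (hsub h1)
    obtain ⟨kb, hkb, rfl⟩ := List.mem_map.mp (hsub h2')
    rw [List.mem_range] at hka hkb
    exact ⟨Int.natCast_nonneg ka,
      by show (ka : Int) < (seq.toList.length : Int); exact_mod_cast hka,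
      Int.natCast_nonneg kb,
      by show (kb : Int) < (seq.toList.length : Int); exact_mod_cast hkb⟩
  obtain ⟨hEq, hNN, hPos⟩ := pv_fold_corr seq.toList (sa.zip sa.tail) hbounds (0, [])
    (0, 0) ⟨rfl, le_rfl, fun h => absurd h (lt_irrefl 0)⟩
  set rA := List.foldl (pvStepA seq.toList) (0, []) (sa.zip sa.tail) with hrA
  set rB := List.foldl (pvStepB seq.toList) (0, 0) (sa.zip sa.tail) with hrB
  by_cases hz : rB.1 = 0
  · rw [hEq, if_pos hz, if_pos hz]
  · rw [hEq, if_neg hz, if_neg hz]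
    have hpos : 0 < rB.1 := lt_of_le_of_ne hNN (Ne.symm hz)
    obtain ⟨hb0, hbn, hsubst⟩ := hPos hpos
    have hcount := pv_count_final seq.toList rB.2 rB.1 hb0 hpos hbn
    have hslice : PySem.List.slice seq.toList (some rB.2) (some (rB.2 + rB.1))
        = (seq.toList.drop rB.2.toNat).take rB.1.toNat := by
      rw [PySem.List.slice_toNat _ hb0 (by omega)]
      congr 1
      omega
    refine Prod.ext rfl (Prod.ext ?_ ?_)
    · show String.ofList rA.2 = String.ofList (PySem.List.slice seq.toList (some rB.2) (some (rB.2 + rB.1)))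
      rw [hsubst, hslice]
    · show pvCountOverlapping seq.toList rA.2 = _
      rw [hsubst]
      exact hcount

-- B equals the canonical form
theorem pv_B_eq_canon (seq : String) : longest_duplicated_substring_alt seq = pvCanon seq := by
  have hR : PySem.List.pyRange 0 ((seq.toList.length : Int)) 1
      = (List.range seq.toList.length).map (fun k : Nat => (k : Int)) := by
    rw [PySem.List.pyRange_one]
    simp
  have hR1 : PySem.List.pyRange 1 ((seq.toList.length : Int)) 1
      = (List.range (seq.toList.length - 1)).map (fun k : Nat => 1 + (k : Int)) := by
    rw [PySem.List.pyRange_one]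
    have h1 : ((seq.toList.length : Int) - 1).toNat = seq.toList.length - 1 := by omega
    rw [h1]
  have hc1 : ∀ k : Nat, ((k + 1 : Nat) : Int) - 1 = (k : Int) := by intro k; push_cast; ring
  have hc2 : ∀ k : Nat, (1 : Int) + (k : Int) = ((k + 1 : Nat) : Int) := by intro k; push_cast; ring
  simp only [longest_duplicated_substring_alt, pvCanon, pvSuffArr, PySem.List.len_eq,
    hR, hR1, List.foldl_map, hc2, hc1, PySem.List.pyGetD_natCast, Int.toNat_natCast]
  set sa := PySem.List.sorted ((List.range seq.toList.length).map (fun k : Nat => (k : Int)))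
      (fun i => PySem.List.slice seq.toList (some i) none) with hsadef
  set R := (PySem.List.enumerate
      (PySem.List.sorted ((List.range seq.toList.length).map (fun k : Nat => (k : Int)))
        (fun i => PySem.List.slice seq.toList (some i) none))).foldl
      (fun rk (p : Int × Int) => PySem.List.pySetD rk p.2 p.1)
      (List.replicate seq.toList.length (0 : Int)) with hRdef
  simp only [← hsadef]
  have hgood : pvSAGood seq.toList sa := by rw [hsadef]; exact pv_suffarr_good seq.toList
  have hnd : sa.Nodup := by
    rw [hsadef]
    exact ((PySem.List.sorted_perm ((List.range seq.toList.length).map (fun k : Nat => (k : Int)))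
      (fun i => PySem.List.slice seq.toList (some i) none) false).symm).nodup
      (pv_R_nodup seq.toList.length)
  have hrank : ∀ m : Nat, m < seq.toList.length → ∀ ρ : Nat, ρ < sa.length →
      sa.getD ρ 0 = (m : Int) → R.getD m 0 = (ρ : Int) := by
    intro m hm ρ hρ he
    have hspec := pv_setfold_spec sa 0 (List.replicate seq.toList.length (0 : Int)) hnd
      (fun x hx => by
        obtain ⟨k, hk, hke⟩ := List.mem_map.mp
          (((PySem.List.sorted_perm ((List.range seq.toList.length).map (fun k : Nat => (k : Int)))
            (fun i => PySem.List.slice seq.toList (some i) none) false)).subset (hsadef ▸ hx))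
        rw [List.mem_range] at hk
        constructor
        · rw [← hke]; positivity
        · rw [← hke]; simpa using hk)
      ρ hρ
    rw [List.getD_eq_getElem _ 0 hρ] at he
    have hRsa : R = (PySem.List.enumerate sa).foldl
        (fun rk (p : Int × Int) => PySem.List.pySetD rk p.2 p.1)
        (List.replicate seq.toList.length (0 : Int)) := by
      rw [hRdef, hsadef]
    rw [hRsa]
    simpa only [he, Int.toNat_natCast, zero_add] using hspec
  have hKS : (List.foldl
        (fun (x : List Int × Int) (y : Nat) =>
          if R.getD y 0 > 0 then
            (PySem.List.pySetD x.1 (R.getD y 0)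
                ((pvLcpIdx seq.toList y (PySem.List.pyGetD sa (R.getD y 0 - 1) 0).toNat x.2.toNat : Nat) : Int),
              if ((pvLcpIdx seq.toList y (PySem.List.pyGetD sa (R.getD y 0 - 1) 0).toNat x.2.toNat : Nat) : Int) ≠ 0 then
                ((pvLcpIdx seq.toList y (PySem.List.pyGetD sa (R.getD y 0 - 1) 0).toNat x.2.toNat : Nat) : Int) - 1
              else ((pvLcpIdx seq.toList y (PySem.List.pyGetD sa (R.getD y 0 - 1) 0).toNat x.2.toNat : Nat) : Int))
          else (x.1, 0))
        (List.replicate seq.toList.length 0, 0) (List.range seq.toList.length))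
      = List.foldl (pvKasaiStep seq.toList sa R) (List.replicate seq.toList.length 0, 0)
          (List.range seq.toList.length) := rfl
  rw [hKS]
  have hInv := pv_kasai seq.toList sa hgood R hrank
  set L := List.foldl (pvKasaiStep seq.toList sa R) (List.replicate seq.toList.length 0, 0)
      (List.range seq.toList.length) with hLdef
  obtain ⟨hl1, hl2, hl3, hl4⟩ := hInv
  have hbest := PySem.List.foldl_congr_mem
    (f := fun (x : Int × Int) (y : Nat) =>
      if min (L.1.getD (y + 1) 0) |sa.getD (y + 1) 0 - sa.getD y 0| > x.1 then
        (min (L.1.getD (y + 1) 0) |sa.getD (y + 1) 0 - sa.getD y 0|,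
          min (sa.getD (y + 1) 0) (sa.getD y 0))
      else x)
    (g := fun (x : Int × Int) (y : Nat) => pvStepB seq.toList x (sa.getD y 0, sa.getD (y + 1) 0))
    (l := List.range (seq.toList.length - 1)) (init := ((0 : Int), (0 : Int)))
    (by
      intro acc k hk
      rw [List.mem_range] at hk
      have hk1 : k + 1 < sa.length := by rw [hgood.1]; omega
      have hlcpv := hl3 (k + 1) (by omega) hk1
        (by have := (hgood.2.1 (k + 1) hk1).2; omega)
      simp only [Nat.add_sub_cancel] at hlcpv
      simp only [pvStepB, hlcpv]
      rw [abs_sub_comm (sa.getD (k + 1) 0) (sa.getD k 0),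
        min_comm (sa.getD (k + 1) 0) (sa.getD k 0)])
  rw [hbest]
  rw [show seq.toList.length - 1 = sa.length - 1 from by rw [hgood.1]]
  rw [pv_adj_fold sa 0 (fun bs a b => pvStepB seq.toList bs (a, b)) ((0 : Int), (0 : Int))]

-- ===== VERDICT (by name: the statement is the Claim_ definition above) =====
theorem longest_duplicated_substring_spec : Claim_equal_longest_duplicated_substring := by
  unfold Claim_equal_longest_duplicated_substring
  intro seq _
  unfold Spec_longest_duplicated_substring
  rw [pv_A_eq_canon, pv_B_eq_canon]
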